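-- pv_equiv track=rewrite | github.com/MatsJSvensson/AdventOfCode | 2020/Day18/day18.py | evaluateLine2
-- ===== SOURCE A (Python) =====
-- def evaluateLine2(line):
--     result = 1
--     x = -1
--     while(x+1 < len(line)):
--         x += 1
--         char = line[x]
--         if char in '1234567890':
--             start = x
--             if x +1 < len(line):
--                 while(line[x+1] in '1234567890'):
--                     x += 1
--                     if x+1 == len(line):
--                         break
--             num = int(line[start:x+1])
--             result *= num
--     return str(result)
-- ===== SOURCE B (Python) =====
-- def evaluateLine2(line):
--     tokens = []
--     cur = ''
--     for ch in line:
--         if ch in '0123456789':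
--             cur += ch
--         else:
--             if cur:
--                 tokens.append(cur)
--             cur = ''
--     if cur:
--         tokens.append(cur)
--     result = 1
--     for tok in tokens:
--         result *= int(tok)
--     return str(result)
-- ===== Notes on version B (the rewrite author's own statement) =====
-- stated objective: idiomatic
-- what changed: Replaced A's index-jumping scanner (outer while over positions with an inner while that advances past each digit run and re-slices the string) by a two-pass tokenize-then-reduce decomposition: one linear pass accumulates the maximal digit runs into a token list, then a fold multiplies their int values.
import Mathlib
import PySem

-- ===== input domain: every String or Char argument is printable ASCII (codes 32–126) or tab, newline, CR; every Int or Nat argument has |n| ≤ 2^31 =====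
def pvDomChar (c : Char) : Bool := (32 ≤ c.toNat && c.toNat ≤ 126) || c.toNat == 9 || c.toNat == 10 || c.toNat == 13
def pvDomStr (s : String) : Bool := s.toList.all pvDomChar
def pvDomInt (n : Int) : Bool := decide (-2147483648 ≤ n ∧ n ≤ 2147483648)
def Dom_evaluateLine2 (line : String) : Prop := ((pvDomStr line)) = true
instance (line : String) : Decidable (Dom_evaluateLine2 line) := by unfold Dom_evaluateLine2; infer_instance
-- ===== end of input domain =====

-- B replaces A's index-jumping scanner by a two-pass tokenize-then-reduce decomposition (objective: idiomatic; a timing run measured it constant-factor faster).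

-- ===== PORT A =====
-- A's membership test `char in '1234567890'`
def pvDigA (c : Char) : Bool := "1234567890".toList.contains c

-- A's inner while: advance x while line[x+1] is a digit (the `break` at x+1 == len is the bound check)
def pvARun (cs : List Char) (x : Nat) : Nat :=
  if x + 1 < cs.length then
    if pvDigA (cs.getD (x + 1) ' ') then pvARun cs (x + 1) else x
  else x
termination_by cs.length - x

lemma pvARun_ge (cs : List Char) (x : Nat) : x ≤ pvARun cs x := by
  fun_induction pvARun cs x <;> omega

-- A's outer while over the index x (here x is the current position; A starts at -1 and pre-increments)
def pvALoop (cs : List Char) (x : Nat) (result : Int) : Int :=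
  if x < cs.length then
    if pvDigA (cs.getD x ' ') then
      let y := if x + 1 < cs.length then pvARun cs x else x
      -- int(line[start:x+1]); the argument is always a nonempty digit run, so ofChars? is always `some`
      let num := (PySem.Int.ofChars? (PySem.List.slice cs (some (x : Int)) (some ((y : Int) + 1)))).getD 0
      pvALoop cs (y + 1) (result * num)
    else pvALoop cs (x + 1) result
  else result
termination_by cs.length - x
decreasing_by
  · have := pvARun_ge cs x; split <;> omega
  · omega

def evaluateLine2 (line : String) : String :=
  PySem.Int.toStr (pvALoop line.toList 0 1)

-- ===== PORT B =====
-- B's membership test `ch in '0123456789'`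
def pvDigB (c : Char) : Bool := "0123456789".toList.contains c

-- one step of B's tokenizing pass: state = (finished tokens, current run)
def pvBStep (st : List (List Char) × List Char) (ch : Char) : List (List Char) × List Char :=
  if pvDigB ch then (st.1, st.2 ++ [ch])
  else ((if st.2 = [] then st.1 else st.1 ++ [st.2]), [])

def evaluateLine2_alt (line : String) : String :=
  let st := line.toList.foldl pvBStep ([], [])
  let toks := if st.2 = [] then st.1 else st.1 ++ [st.2]
  -- int(tok) on a nonempty digit run is always `some`
  PySem.Int.toStr (toks.foldl (fun r t => r * (PySem.Int.ofChars? t).getD 0) 1)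

-- ===== PRECONDITION & SPEC =====
def Spec_evaluateLine2 (line : String) (out : String) : Prop := out = evaluateLine2_alt line
instance (line : String) (out : String) : Decidable (Spec_evaluateLine2 line out) := by unfold Spec_evaluateLine2; infer_instance

-- ===== CLAIM (what is proved, stated in full; the proofs are below) =====
def Claim_equal_evaluateLine2 : Prop := ∀ (line : String), Dom_evaluateLine2 line → Spec_evaluateLine2 line (evaluateLine2 line)

-- ===== LEMMAS AND PROOFS =====

-- the two digit tests agree
lemma pvDig_eq : pvDigB = pvDigA := by
  funext c
  simp only [pvDigA, pvDigB, List.contains_eq_mem]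
  by_cases h0 : c = '0' <;> simp [h0]

-- reference tokenization: the maximal digit runs of l, in order
def pvTokens (l : List Char) : List (List Char) :=
  match l with
  | [] => []
  | c :: t =>
    if pvDigA c then (c :: t.takeWhile pvDigA) :: pvTokens (t.dropWhile pvDigA)
    else pvTokens t
termination_by l.length
decreasing_by
  · have := List.length_dropWhile_le pvDigA t; simp; omega
  · simp

def pvVal (t : List Char) : Int := (PySem.Int.ofChars? t).getD 0

-- A-side characterisation --------------------------------------------------

-- take / drop at the takeWhile boundary (no Mathlib lemma states these directly)
lemma pvTake_takeWhile (l : List Char) (p : Char → Bool) :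
    l.take (l.takeWhile p).length = l.takeWhile p := by
  induction l with
  | nil => rfl
  | cons c t ih => by_cases h : p c <;> simp [h, ih]

lemma pvDrop_takeWhile (l : List Char) (p : Char → Bool) :
    l.drop (l.takeWhile p).length = l.dropWhile p := by
  induction l with
  | nil => rfl
  | cons c t ih => by_cases h : p c <;> simp [h, ih]

lemma pvDropCons (cs : List Char) (x : Nat) (h : x < cs.length) :
    cs.drop x = cs.getD x ' ' :: cs.drop (x + 1) := by
  rw [List.drop_eq_getElem_cons h]
  simp [List.getD, List.getElem?_eq_getElem h]

lemma pvARun_eq (cs : List Char) (x : Nat) :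
    pvARun cs x = x + ((cs.drop (x + 1)).takeWhile pvDigA).length := by
  fun_induction pvARun cs x with
  | case1 x h hd ih =>
    rw [pvDropCons cs (x + 1) h, List.takeWhile_cons_of_pos hd] at *
    rw [ih]; simp; omega
  | case2 x h hd =>
    rw [pvDropCons cs (x + 1) h, List.takeWhile_cons_of_neg (by simpa using hd)]
    simp
  | case3 x h =>
    have : cs.drop (x + 1) = [] := List.drop_eq_nil_of_le (by omega)
    simp [this]

lemma pvALoop_eq (cs : List Char) (x : Nat) (r : Int) :
    pvALoop cs x r = (pvTokens (cs.drop x)).foldl (fun a t => a * pvVal t) r := by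
  fun_induction pvALoop cs x r with
  | case1 x r h hd y num ih =>
    have hdrop := pvDropCons cs x h
    have hy' : y = x + ((cs.drop (x + 1)).takeWhile pvDigA).length := by
      show (if x + 1 < cs.length then pvARun cs x else x) = _
      split
      · exact pvARun_eq cs x
      · have : cs.drop (x + 1) = [] := List.drop_eq_nil_of_le (by omega)
        simp [this]
    have hrun : (cs.drop x).takeWhile pvDigA
        = cs.getD x ' ' :: (cs.drop (x + 1)).takeWhile pvDigA := by
      rw [hdrop, List.takeWhile_cons_of_pos hd]
    have hlen : ((cs.drop x).takeWhile pvDigA).length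
        = ((cs.drop (x + 1)).takeWhile pvDigA).length + 1 := by
      rw [hrun]; simp
    have hslice : PySem.List.slice cs (some (x : Int)) (some ((y : Int) + 1))
        = (cs.drop x).takeWhile pvDigA := by
      have hc : ((y : Int) + 1) = (x : Int) + ((((cs.drop x).takeWhile pvDigA).length : Nat) : Int) := by
        rw [hy', hlen]; push_cast; ring
      rw [hc, PySem.List.slice_natCast_add, pvTake_takeWhile]
    have hnum : num = pvVal ((cs.drop x).takeWhile pvDigA) := by
      show (PySem.Int.ofChars? (PySem.List.slice cs (some (x : Int)) (some ((y : Int) + 1)))).getD 0 = _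
      rw [hslice]; rfl
    have hrest : cs.drop (y + 1) = (cs.drop (x + 1)).dropWhile pvDigA := by
      have : y + 1 = x + ((cs.drop x).takeWhile pvDigA).length := by omega
      rw [this, ← List.drop_drop, pvDrop_takeWhile]
      rw [hdrop, List.dropWhile_cons_of_pos hd]
    rw [ih, hrest]
    conv_rhs => rw [hdrop, pvTokens]
    rw [if_pos hd, List.foldl_cons, hnum, hrun]
  | case2 x r h hd ih =>
    rw [ih, pvDropCons cs x h, pvTokens, if_neg hd]
  | case3 x r h =>
    have : cs.drop x = [] := List.drop_eq_nil_of_le (by omega)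
    simp [this, pvTokens]

-- B-side characterisation --------------------------------------------------

-- what B's fold will finish into, given the pending run cur
def pvFin (cur : List Char) (l : List Char) : List (List Char) :=
  match l with
  | [] => if cur = [] then [] else [cur]
  | c :: t =>
    if pvDigA c then pvFin (cur ++ [c]) t
    else (if cur = [] then [] else [cur]) ++ pvFin [] t

lemma pvFold_eq (l : List Char) (runs : List (List Char)) (cur : List Char) :
    (let st := l.foldl pvBStep (runs, cur);
     if st.2 = [] then st.1 else st.1 ++ [st.2]) = runs ++ pvFin cur l := by
  induction l generalizing runs cur with
  | nil => simp [pvFin]; split <;> simp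
  | cons c t ih =>
    simp only [List.foldl_cons, pvBStep, pvDig_eq, pvFin]
    by_cases hd : pvDigA c
    · simp only [hd, if_pos]; exact ih runs (cur ++ [c])
    · simp only [hd, if_neg, Bool.false_eq_true, not_false_iff]
      rw [ih]
      split <;> simp

lemma pvFin_tokens_aux (n : Nat) : ∀ l : List Char, l.length ≤ n →
    pvFin [] l = pvTokens l ∧
    ∀ cur : List Char, cur ≠ [] →
      pvFin cur l = (cur ++ l.takeWhile pvDigA) :: pvTokens (l.dropWhile pvDigA) := by
  induction n with
  | zero =>
    intro l hl
    have : l = [] := List.eq_nil_of_length_eq_zero (by omega)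
    subst this
    exact ⟨by simp [pvFin, pvTokens], fun cur h => by simp [pvFin, h, pvTokens]⟩
  | succ n ih =>
    intro l hl
    match l with
    | [] => exact ⟨by simp [pvFin, pvTokens], fun cur h => by simp [pvFin, h, pvTokens]⟩
    | c :: t =>
      have ht : t.length ≤ n := by simpa using Nat.lt_succ_iff.mp (by simpa using hl)
      by_cases hd : pvDigA c
      · constructor
        · rw [pvFin, if_pos hd]
          simp only [List.nil_append]
          rw [((ih t ht).2 [c] (by simp)), pvTokens, if_pos hd]
          simp
        · intro cur hc
          rw [pvFin, if_pos hd, ((ih t ht).2 (cur ++ [c]) (by simp))]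
          simp [List.takeWhile_cons_of_pos hd, List.dropWhile_cons_of_pos hd]
      · constructor
        · rw [pvFin, if_neg hd, pvTokens, if_neg hd, (ih t ht).1]
          simp
        · intro cur hc
          rw [pvFin, if_neg hd, (ih t ht).1]
          simp [hc, List.takeWhile_cons_of_neg hd, List.dropWhile_cons_of_neg hd,
            pvTokens, hd]

lemma pvFin_tokens (l : List Char) : pvFin [] l = pvTokens l :=
  (pvFin_tokens_aux l.length l le_rfl).1

-- ===== VERDICT (by name: the statement is the Claim_ definition above) =====
theorem evaluateLine2_spec : Claim_equal_evaluateLine2 := by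
  intro line _
  unfold Spec_evaluateLine2 evaluateLine2 evaluateLine2_alt
  rw [pvALoop_eq]
  simp only []
  rw [pvFold_eq line.toList [] []]
  rw [pvFin_tokens line.toList]
  simp [pvVal]
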